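-- pv_equiv track=rewrite | github.com/NECC/Material-Do-Curso | Cadeiras não lecionadas atualmente/Laboratório de Algoritmia II/Treinos/Treino 1/hacker.py | hacker
-- ===== SOURCE A (Python) =====
-- def hacker(log):
--     mails = {}
--     for cartao,email in log:
--         if email not in mails:
--             mails[email] = cartao
--         else:
--             cartaoAntigo = mails[email]
--             cartaoNovo = ""
--             for i in range(len(cartaoAntigo)):
--                 if cartao[i] != '*':
--                     cartaoNovo += cartao[i]
--                 else:
--                     cartaoNovo += cartaoAntigo[i]
--             mails[email] = cartaoNovo
--
--     result = [(mails[x],x) for x in mails]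
--     result.sort(key=lambda x: (-len(list(filter(lambda k: k != '*', x[0]))),x[1]))
--     return result
-- ===== SOURCE B (Python) =====
-- def hacker(log):
--     # Per-position reverse search instead of A's sequential merge: group cards
--     # per email, then each output char i is the last non-'*' char at i (or '*').
--     groups = {}
--     for cartao, email in log:
--         groups.setdefault(email, []).append(cartao)
--     out = []
--     for email, cards in groups.items():
--         merged = ''.join(
--             next((c[i] for c in reversed(cards) if c[i] != '*'), '*')
--             for i in range(len(cards[0])))
--         out.append((merged, email))
--     out.sort(key=lambda p: (-sum(ch != '*' for ch in p[0]), p[1]))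
--     return out
-- ===== Notes on version B (the rewrite author's own statement) =====
-- stated objective: alternative
-- what changed: B replaces A's sequential accumulate-and-overwrite merge with a positional algorithm: group the cards per email, then compute each output character independently as the last non-'*' character at that position (searching the email's cards in reverse), defaulting to '*'.
import Mathlib
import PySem

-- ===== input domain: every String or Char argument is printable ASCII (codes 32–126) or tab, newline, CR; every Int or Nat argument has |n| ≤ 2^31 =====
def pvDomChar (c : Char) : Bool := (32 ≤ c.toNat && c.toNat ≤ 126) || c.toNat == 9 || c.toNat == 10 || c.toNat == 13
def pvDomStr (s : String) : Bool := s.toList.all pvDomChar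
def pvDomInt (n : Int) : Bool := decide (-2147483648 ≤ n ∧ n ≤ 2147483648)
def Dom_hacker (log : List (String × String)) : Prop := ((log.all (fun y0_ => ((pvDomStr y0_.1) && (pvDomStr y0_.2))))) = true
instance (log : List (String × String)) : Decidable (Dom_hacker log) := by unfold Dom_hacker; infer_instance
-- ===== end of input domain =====

-- B groups the cards per email and then computes each merged character positionally,
-- as the last non-'*' character at that position (reverse search, default '*'),
-- instead of A's sequential accumulate-and-overwrite merge; return value only.

-- ===== PORT A =====
-- inner loop of A: for i in range(len(cartaoAntigo)): cartaoNovo += (cartao[i] if ≠'*' else cartaoAntigo[i])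
-- (cartao[i] would raise IndexError for a shorter cartao; excluded by Pre_ below, pyGetD's default is never read there)
def hackerMergeA (cartaoAntigo cartao : List Char) : List Char :=
  (PySem.List.pyRange 0 (cartaoAntigo.length : Int) 1).foldl
    (fun cartaoNovo i =>
      if PySem.List.pyGetD cartao i ' ' ≠ '*' then cartaoNovo ++ [PySem.List.pyGetD cartao i ' ']
      else cartaoNovo ++ [PySem.List.pyGetD cartaoAntigo i ' '])
    []

def hacker (log : List (String × String)) : List (String × String) :=
  let mails : PySem.Dict String (List Char) :=
    log.foldl (fun mails p =>
      if mails.contains p.2 = false then mails.insert p.2 p.1.toList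
      else mails.insert p.2 (hackerMergeA (mails.getD p.2 []) p.1.toList)) PySem.Dict.empty
  let result : List (String × String) := mails.items.map (fun q => (String.ofList q.2, q.1))
  PySem.List.sorted2 result
    (fun x => -(((x.1.toList.filter (fun k => k != '*')).length : Int)))
    (fun x => x.2)

-- ===== PORT B =====
-- next((c[i] for c in reversed(cards) if c[i] != '*'), '*') : first non-'*' along the given list
def hackerScanB (cards : List (List Char)) (i : Int) : Char :=
  match cards with
  | [] => '*'
  | c :: rest =>
    if PySem.List.pyGetD c i ' ' ≠ '*' then PySem.List.pyGetD c i ' ' else hackerScanB rest i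

-- ''.join(next(...) for i in range(len(cards[0])))
def hackerMergedB (cards : List (List Char)) : List Char :=
  (PySem.List.pyRange 0 ((PySem.List.pyGetD cards 0 []).length : Int) 1).map
    (fun i => hackerScanB cards.reverse i)

def hacker_alt (log : List (String × String)) : List (String × String) :=
  let groups : PySem.Dict String (List (List Char)) :=
    log.foldl (fun groups p => groups.modify p.2 [] (fun l => l ++ [p.1.toList])) PySem.Dict.empty
  let out : List (String × String) :=
    groups.items.map (fun q => (String.ofList (hackerMergedB q.2), q.1))
  PySem.List.sorted2 out
    (fun p => -((p.1.toList.countP (fun ch => ch != '*') : Int)))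
    (fun p => p.2)

-- ===== PRECONDITION & SPEC =====
-- the cards of e-mail e, in log order, as char lists
def pvCardsOf (log : List (String × String)) (e : String) : List (List Char) :=
  (log.filter (fun q => q.2 == e)).map (fun q => q.1.toList)

-- Pre_ excludes exactly the inputs where A raises IndexError: a later card for some
-- e-mail shorter than that e-mail's first card.
def Pre_hacker (log : List (String × String)) : Prop :=
  ∀ e ∈ log.map (fun p => p.2), ∀ c ∈ (pvCardsOf log e).tail,
    ((pvCardsOf log e).headD []).length ≤ c.length
instance (log : List (String × String)) : Decidable (Pre_hacker log) := by
  unfold Pre_hacker; infer_instance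

def pvWitness_hacker : (List (String × String)) := [("12*4", "a@b"), ("*567", "a@b"), ("99", "c")]

def Spec_hacker (log : List (String × String)) (out : List (String × String)) : Prop := out = hacker_alt log
instance (log : List (String × String)) (out : List (String × String)) : Decidable (Spec_hacker log out) := by unfold Spec_hacker; infer_instance

-- ===== CLAIM (what is proved, stated in full; the proofs are below) =====
def Claim_equal_hacker : Prop := ∀ (log : List (String × String)), Dom_hacker log → Pre_hacker log → Spec_hacker log (hacker log)

-- ===== LEMMAS AND PROOFS =====

-- A's per-e-mail result, produced by folding A's merge over the grouped cards
def pvReduceA (cs : List (List Char)) : List Char :=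
  match cs with
  | [] => []
  | c :: rest => rest.foldl hackerMergeA c

-- state of A's dict at key e after folding, as a function of the incoming value
def pvAfter (o : Option (List Char)) (cs : List (List Char)) : Option (List Char) :=
  match o, cs with
  | none, [] => none
  | none, c :: rest => some (rest.foldl hackerMergeA c)
  | some v, cs => some (cs.foldl hackerMergeA v)

-- Nat-index version of B's reverse scan
def pvScanN (cards : List (List Char)) (i : Nat) : Char :=
  match cards with
  | [] => '*'
  | c :: rest => if c.getD i ' ' ≠ '*' then c.getD i ' ' else pvScanN rest i

theorem scanB_natCast (cards : List (List Char)) (i : Nat) :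
    hackerScanB cards (i : Int) = pvScanN cards i := by
  induction cards with
  | nil => rfl
  | cons c rest ih => simp [hackerScanB, pvScanN, ih]

theorem pv_foldl_append_ite {α β : Type} (p : α → Prop) [DecidablePred p] (f g : α → β)
    (l : List α) (acc : List β) :
    l.foldl (fun a x => if p x then a ++ [f x] else a ++ [g x]) acc
      = acc ++ l.map (fun x => if p x then f x else g x) := by
  induction l generalizing acc with
  | nil => simp
  | cons x t ih => simp only [List.foldl_cons, ih, List.map_cons]; split <;> simp

theorem mergeA_eq_map (a n : List Char) :
    hackerMergeA a n = (List.range a.length).map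
      (fun i => if n.getD i ' ' ≠ '*' then n.getD i ' ' else a.getD i ' ') := by
  unfold hackerMergeA
  rw [PySem.List.pyRange_zero_nat, List.foldl_map, pv_foldl_append_ite]
  simp

theorem mergeA_length (a n : List Char) : (hackerMergeA a n).length = a.length := by
  rw [mergeA_eq_map]; simp

theorem foldl_mergeA_length (t : List (List Char)) (c : List Char) :
    (t.foldl hackerMergeA c).length = c.length := by
  induction t generalizing c with
  | nil => rfl
  | cons d t ih => simp only [List.foldl_cons]; rw [ih, mergeA_length]

theorem mergedB_eq_map (c : List Char) (rest : List (List Char)) :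
    hackerMergedB (c :: rest)
      = (List.range c.length).map (fun i => pvScanN ((c :: rest).reverse) i) := by
  unfold hackerMergedB
  rw [PySem.List.pyGetD_zero_cons, PySem.List.pyRange_zero_nat, List.map_map]
  exact List.map_congr_left (fun i _ => scanB_natCast _ i)

-- core: A's left fold over the cards equals B's per-position reverse scan
theorem foldl_mergeA_eq_scan (rest : List (List Char)) (c : List Char)
    (hall : ∀ x ∈ rest, c.length ≤ x.length) :
    rest.foldl hackerMergeA c
      = (List.range c.length).map (fun i => pvScanN ((c :: rest).reverse) i) := by
  induction rest using List.reverseRecOn with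
  | nil =>
    apply List.ext_getElem
    · simp
    · intro i h1 h2
      have hi : i < c.length := by simpa using h1
      simp only [List.reverse_cons, List.reverse_nil, List.nil_append,
        List.getElem_map, List.getElem_range, pvScanN, List.getD_eq_getElem?_getD,
        List.getElem?_eq_getElem hi, Option.getD_some]
      simp only [List.foldl_nil]
      split
      · rfl
      · simp_all
  | append_singleton t d ih =>
    have hd : c.length ≤ d.length := hall d (by simp)
    have ht : ∀ x ∈ t, c.length ≤ x.length := fun x hx => hall x (by simp [hx])
    rw [List.foldl_append, List.foldl_cons, List.foldl_nil, mergeA_eq_map,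
      foldl_mergeA_length]
    apply List.map_congr_left
    intro i hi
    have hic : i < c.length := List.mem_range.1 hi
    have hrev : (c :: (t ++ [d])).reverse = d :: (c :: t).reverse := by simp
    rw [hrev]
    simp only [pvScanN]
    have hfold : (t.foldl hackerMergeA c).getD i ' ' = pvScanN ((c :: t).reverse) i :=
      by rw [ih ht, PySem.List.getD_map_range _ _ _ _ hic]
    simp only [List.getD_eq_getElem?_getD, List.reverse_cons] at hfold ⊢
    by_cases hdc : d[i]?.getD ' ' = '*' <;> simp [hdc, hfold]

theorem reduceA_eq_mergedB (cs : List (List Char))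
    (h : ∀ x ∈ cs.tail, (cs.headD []).length ≤ x.length) (hne : cs ≠ []) :
    pvReduceA cs = hackerMergedB cs := by
  cases cs with
  | nil => exact absurd rfl hne
  | cons c rest =>
    rw [mergedB_eq_map]
    exact foldl_mergeA_eq_scan rest c (by simpa using h)

-- A's loop body, written as a single insert (for the keys lemma)
theorem stepA_eq_insert :
    (fun (mails : PySem.Dict String (List Char)) (p : String × String) =>
      if mails.contains p.2 = false then mails.insert p.2 p.1.toList
      else mails.insert p.2 (hackerMergeA (mails.getD p.2 []) p.1.toList))
    = (fun mails p => mails.insert p.2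
        (if mails.contains p.2 = false then p.1.toList
         else hackerMergeA (mails.getD p.2 []) p.1.toList)) := by
  funext m p; split <;> rfl

theorem pvCardsOf_cons (p : String × String) (rest : List (String × String)) (e : String) :
    pvCardsOf (p :: rest) e
      = if p.2 = e then p.1.toList :: pvCardsOf rest e else pvCardsOf rest e := by
  simp only [pvCardsOf, List.filter_cons]
  by_cases h : p.2 = e <;> simp [h]

theorem dictA_get? (log : List (String × String)) (m : PySem.Dict String (List Char)) (e : String) :
    (log.foldl (fun mails p =>
      if mails.contains p.2 = false then mails.insert p.2 p.1.toList
      else mails.insert p.2 (hackerMergeA (mails.getD p.2 []) p.1.toList)) m).get? e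
    = pvAfter (m.get? e) (pvCardsOf log e) := by
  induction log generalizing m with
  | nil =>
    simp only [List.foldl_nil, pvCardsOf, List.filter_nil, List.map_nil]
    cases m.get? e <;> rfl
  | cons p rest ih =>
    simp only [List.foldl_cons, ih, pvCardsOf_cons]
    by_cases he : p.2 = e
    · subst he
      by_cases hc : m.contains p.2 = false
      · have hnone : m.get? p.2 = none := (PySem.Dict.get?_eq_none_iff_contains m p.2).2 hc
        simp [hc, hnone, pvAfter]
      · have hsome : (m.get? p.2).isSome := by
          cases hg : m.get? p.2 with
          | none => exact absurd ((PySem.Dict.get?_eq_none_iff_contains m p.2).1 hg) hc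
          | some v => rfl
        obtain ⟨v, hv⟩ := Option.isSome_iff_exists.1 hsome
        have hgd : m.getD p.2 [] = v := PySem.Dict.getD_of_get?_eq_some m [] hv
        simp [hc, hv, hgd, pvAfter]
    · have hne : e ≠ p.2 := fun h => he h.symm
      by_cases hc : m.contains p.2 = false <;>
        simp [hc, PySem.Dict.get?_insert, hne, he]

theorem dictB_getD (log : List (String × String)) (e : String) :
    (log.foldl (fun (groups : PySem.Dict String (List (List Char))) p =>
        groups.modify p.2 [] (fun l => l ++ [p.1.toList])) PySem.Dict.empty).getD e []
    = pvCardsOf log e := by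
  have h : (log.foldl (fun (groups : PySem.Dict String (List (List Char))) p =>
        groups.modify p.2 [] (fun l => l ++ [p.1.toList])) PySem.Dict.empty)
      = ((log.map (fun p => (p.2, p.1.toList))).foldl
          (fun d q => d.modify q.1 [] (fun l => l ++ [q.2])) PySem.Dict.empty) := by
    rw [List.foldl_map]
  rw [h, PySem.Dict.getD_foldl_modify_append]
  simp [pvCardsOf, List.filter_map, Function.comp_def]

theorem pvCardsOf_ne_nil (log : List (String × String)) (e : String)
    (h : e ∈ log.map (fun p => p.2)) : pvCardsOf log e ≠ [] := by
  obtain ⟨p, hp, hpe⟩ := List.mem_map.1 h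
  simp only [pvCardsOf, ne_eq, List.map_eq_nil_iff, List.filter_eq_nil_iff]
  intro hf
  exact (hf p hp) (by simp [hpe])

theorem neg_len_filter_eq_neg_countP (l : List Char) :
    -(((l.filter (fun k => k != '*')).length : Int))
      = -((l.countP (fun ch => ch != '*') : Int)) := by
  rw [List.countP_eq_length_filter]

-- ===== VERDICT (by name: the statement is the Claim_ definition above) =====
theorem hacker_spec : Claim_equal_hacker := by
  intro log _ hpre
  unfold Spec_hacker
  simp only [hacker, hacker_alt]
  set mails := log.foldl (fun (mails : PySem.Dict String (List Char)) p =>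
      if mails.contains p.2 = false then mails.insert p.2 p.1.toList
      else mails.insert p.2 (hackerMergeA (mails.getD p.2 []) p.1.toList)) PySem.Dict.empty with hm
  set groups := log.foldl (fun (groups : PySem.Dict String (List (List Char))) p =>
      groups.modify p.2 [] (fun l => l ++ [p.1.toList])) PySem.Dict.empty with hg
  have hkA : mails.keys = PySem.Set.update ([] : PySem.Set String) (log.map (fun p => p.2)) := by
    rw [hm, stepA_eq_insert,
      PySem.Dict.keys_foldl_insert_key log (fun p => p.2) _ PySem.Dict.empty]
    simp
  have hkB : groups.keys = PySem.Set.update ([] : PySem.Set String) (log.map (fun p => p.2)) := by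
    rw [hg, PySem.Dict.keys_foldl_modify_key log (fun p => p.2) []
      (fun _ p l => l ++ [p.1.toList]) PySem.Dict.empty]
    simp
  have hndA : mails.keys.Nodup := by
    rw [hm, stepA_eq_insert]
    exact PySem.Dict.nodup_keys_foldl_insert_key log (fun p => p.2) _ PySem.Dict.empty
      (by simp)
  have hndB : groups.keys.Nodup := by
    rw [hg]
    exact PySem.Dict.nodup_keys_foldl_modify_key log (fun p => p.2) []
      (fun _ p l => l ++ [p.1.toList]) PySem.Dict.empty (by simp)
  rw [PySem.Dict.items_eq_map_keys mails hndA [], PySem.Dict.items_eq_map_keys groups hndB [],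
    hkA, hkB]
  rw [List.map_map, List.map_map]
  simp only [Function.comp_def]
  have hlist : ∀ k ∈ PySem.Set.update ([] : PySem.Set String) (log.map (fun p => p.2)),
      (String.ofList (mails.getD k []), k)
        = (String.ofList (hackerMergedB (groups.getD k [])), k) := by
    intro k hk
    have hkmem : k ∈ log.map (fun p => p.2) := by
      have : k ∈ PySem.Set.ofList (log.map (fun p => p.2)) := by
        rw [PySem.Set.ofList_eq_foldl]; exact hk
      exact (PySem.Set.mem_ofList _ _).1 this
    have hcs : pvCardsOf log k ≠ [] := pvCardsOf_ne_nil log k hkmem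
    have hA : mails.getD k [] = pvReduceA (pvCardsOf log k) := by
      rw [PySem.Dict.getD_eq_get?_getD, hm, dictA_get?]
      simp only [PySem.Dict.get?_empty]
      cases hc : pvCardsOf log k with
      | nil => exact absurd hc hcs
      | cons c rest => simp [pvAfter, pvReduceA]
    have hB : groups.getD k [] = pvCardsOf log k := by rw [hg]; exact dictB_getD log k
    rw [hA, hB, reduceA_eq_mergedB (pvCardsOf log k) (hpre k hkmem) hcs]
  have heq : (PySem.Set.update ([] : PySem.Set String) (log.map (fun p => p.2))).map
        (fun k => (String.ofList (mails.getD k []), k))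
      = (PySem.Set.update ([] : PySem.Set String) (log.map (fun p => p.2))).map
        (fun k => (String.ofList (hackerMergedB (groups.getD k [])), k)) :=
    List.map_congr_left hlist
  rw [heq]
  congr 1
  funext x
  exact neg_len_filter_eq_neg_countP x.1.toList
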